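-- pv_equiv track=rewrite | github.com/lmiles876/ende | decryption.py | string_setup
-- ===== SOURCE A (Python) =====
-- lowers = {x: chr(x) for x in range(97, 123)}
--
-- def get_key(dictionary, value):
--     for key, val in dictionary.items():
--         if val == value:
--             return key
--
-- def string_setup(string):
--     string = (string.replace(' ', '')).lower()
--     count = 0
--     while len(string) % 3 != 0:
--         string += 'a'
--         count += 1
--     stringmat = []
--     for i in range(0, int(len(string)), 3):
--         stringmat.append(list(string[0+i:i+3]))
--     for i in range(len(stringmat)):
--         for j in range(3):
--             stringmat[i][j] = int(get_key(lowers, stringmat[i][j]) - 97)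
--     return stringmat, count
-- ===== SOURCE B (Python) =====
-- def string_setup(string):
--     mat = []
--     row = []
--     for c in string:
--         if c == ' ':
--             continue
--         row.append(ord(c.lower()) - 97)
--         if len(row) == 3:
--             mat.append(row)
--             row = []
--     count = 0
--     if row:
--         count = 3 - len(row)
--         row += [0] * count
--         mat.append(row)
--     return mat, count
-- ===== Notes on version B (the rewrite author's own statement) =====
-- stated objective: simpler
-- what changed: Single pass over the original characters building rows of indices incrementally (drop spaces, lowercase, ord(c)-97, push a row whenever it reaches 3, zero-pad the final partial row), instead of building a padded intermediate string, slicing it into 3-char chunks, and resolving each character by a linear scan of the 26-entry lowers dict; dropping that per-character scan and the intermediate strings is the constant-factor speedup.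
import Mathlib
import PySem

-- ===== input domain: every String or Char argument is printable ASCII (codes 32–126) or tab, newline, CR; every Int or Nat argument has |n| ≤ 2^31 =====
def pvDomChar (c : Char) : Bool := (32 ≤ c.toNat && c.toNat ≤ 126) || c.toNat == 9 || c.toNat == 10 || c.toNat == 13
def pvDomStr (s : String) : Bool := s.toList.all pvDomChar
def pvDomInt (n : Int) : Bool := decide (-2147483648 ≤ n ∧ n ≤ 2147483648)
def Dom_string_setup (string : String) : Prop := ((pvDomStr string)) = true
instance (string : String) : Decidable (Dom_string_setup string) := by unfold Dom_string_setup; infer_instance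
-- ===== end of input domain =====

-- B replaces A's padded intermediate string, 3-slicing and per-character reverse dict scan by a
-- single pass that builds the index rows incrementally (objective: simpler).

-- ===== PORT A =====
-- lowers = {x: chr(x) for x in range(97, 123)}   (chr(x) = Char.ofNat x.toNat, exact for 97 ≤ x < 123)
def lowersA : PySem.Dict Int Char :=
  (PySem.List.pyRange 97 123 1).foldl (fun d x => d.insert x (Char.ofNat x.toNat)) PySem.Dict.empty

-- get_key(dictionary, value): scan dictionary.items() for the first key whose value matches
def getKeyA : List (Int × Char) → Char → Option Int
  | [], _ => none
  | (key, v) :: rest, value => if v == value then some key else getKeyA rest value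

-- while len(string) % 3 != 0: string += 'a'; count += 1
def padA (l : List Char) (count : Int) : List Char × Int :=
  if l.length % 3 ≠ 0 then padA (l ++ ['a']) (count + 1) else (l, count)
  termination_by (3 - l.length % 3) % 3
  decreasing_by simp only [List.length_append, List.length_singleton]; omega

-- int(get_key(lowers, ch) - 97); when get_key returns None, Python raises TypeError (outside Pre_),
-- so the none branch (value 0) is unreachable inside Pre_
def elemA (c : Char) : Int :=
  match getKeyA lowersA.items c with
  | some key => key - 97
  | none => 0

def string_setup (string : String) : List (List Int) × Int :=
  let s := PySem.Str.lower (PySem.Str.replace string " " "")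
  let p := padA s.toList 0
  let stringmat := (PySem.List.pyRange 0 (p.1.length : Int) 3).foldl
      (fun acc i => acc ++ [PySem.List.slice p.1 (some (0 + i)) (some (i + 3))]) []
  -- stringmat[i][j] = int(get_key(lowers, stringmat[i][j]) - 97): in-place update ported as a map
  -- (the element type changes Char → Int); rows have length 3, so the pyGetD default is never used
  (stringmat.map (fun row => (PySem.List.pyRange 0 3 1).map
      (fun j => elemA (PySem.List.pyGetD row j 'a'))), p.2)

-- ===== PORT B =====
def string_setup_alt (string : String) : List (List Int) × Int :=
  let st := string.toList.foldl
    (fun (st : List (List Int) × List Int) c =>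
      if c == ' ' then st
      else
        let row := st.2 ++ [((PySem.Chars.lowerChar c).toNat : Int) - 97]
        if row.length == 3 then (st.1 ++ [row], []) else (st.1, row))
    ([], [])
  if st.2.isEmpty then (st.1, 0)
  else (st.1 ++ [st.2 ++ List.replicate (3 - st.2.length) 0], (3 : Int) - (st.2.length : Int))

-- ===== PRECONDITION & SPEC =====
-- Pre_ excludes exactly the inputs containing a character that is neither a space nor an ASCII letter:
-- there get_key returns None and A raises TypeError on None - 97.
def Pre_string_setup (string : String) : Prop :=
  string.toList.all (fun c => c == ' ' || PySem.Chars.isalpha c) = true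
instance (string : String) : Decidable (Pre_string_setup string) := by
  unfold Pre_string_setup; infer_instance

def pvWitness_string_setup : String := "Hello World"

def Spec_string_setup (string : String) (out : List (List Int) × Int) : Prop := out = string_setup_alt string
instance (string : String) (out : List (List Int) × Int) : Decidable (Spec_string_setup string out) := by unfold Spec_string_setup; infer_instance

-- ===== CLAIM (what is proved, stated in full; the proofs are below) =====
def Claim_equal_string_setup : Prop := ∀ (string : String), Dom_string_setup string → Pre_string_setup string → Spec_string_setup string (string_setup string)

-- ===== LEMMAS AND PROOFS =====

-- chunk-into-threes, the common shape both sides are reduced to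
def chunk3 {α : Type} : List α → List (List α)
  | a :: b :: c :: t => [a, b, c] :: chunk3 t
  | _ => []

-- B's loop body on a non-space character, as a function of the appended index value
def stepI (st : List (List Int) × List Int) (v : Int) : List (List Int) × List Int :=
  let row := st.2 ++ [v]
  if row.length == 3 then (st.1 ++ [row], []) else (st.1, row)

-- B's post-loop padding of the final partial row
def finishB (st : List (List Int) × List Int) : List (List Int) × Int :=
  if st.2.isEmpty then (st.1, 0)
  else (st.1 ++ [st.2 ++ List.replicate (3 - st.2.length) 0], (3 : Int) - (st.2.length : Int))

-- str.replace(' ', '') is filter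
lemma replace_go_space (fuel : Nat) : ∀ (s acc : List Char), s.length ≤ fuel →
    PySem.Chars.replace.go [' '] [] fuel s acc = acc.reverse ++ s.filter (fun c => !(c == ' ')) := by
  induction fuel with
  | zero => intro s acc h; have : s = [] := List.eq_nil_of_length_eq_zero (Nat.le_zero.mp h); subst this
            simp [PySem.Chars.replace.go]
  | succ n ih =>
    intro s acc h
    cases s with
    | nil => simp [PySem.Chars.replace.go]
    | cons c t =>
      simp only [PySem.Chars.replace.go, List.isPrefixOf, List.filter]
      by_cases hc : c = ' '
      · subst hc
        simp only [beq_self_eq_true, Bool.true_and, if_true]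
        rw [ih _ _ (by simpa using Nat.le_of_succ_le_succ h)]
        simp
      · have : ((' ' : Char) == c) = false := by simp [BEq.beq]; exact fun h' => hc h'.symm
        simp only [this, Bool.false_and, Bool.false_eq_true, if_false]
        rw [ih _ _ (by simpa using Nat.le_of_succ_le_succ h)]
        have hcb : (!(c == ' ')) = true := by simp [hc]
        rw [hcb]
        simp

lemma replace_space (s : List Char) :
    PySem.Chars.replace s [' '] [] = s.filter (fun c => !(c == ' ')) := by
  rw [PySem.Chars.replace]
  simp only [List.isEmpty_cons, if_false]
  exact replace_go_space s.length s [] le_rfl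

-- the while-loop pads with ((3 - len % 3) % 3) copies of 'a'
lemma padA_spec (l : List Char) (c : Int) :
    padA l c = (l ++ List.replicate ((3 - l.length % 3) % 3) 'a',
                c + (((3 - l.length % 3) % 3 : Nat) : Int)) := by
  rcases h3 : l.length % 3 with _ | _ | _ | k
  · rw [padA]; simp [h3]
  · rw [padA]; rw [if_pos (by omega)]
    rw [padA]; rw [if_pos (by simp [List.length_append]; omega)]
    rw [padA]; rw [if_neg (by simp [List.length_append]; omega)]
    simp only [h3, List.append_assoc, Prod.mk.injEq]
    refine ⟨by rfl, by push_cast; ring⟩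
  · rw [padA]; rw [if_pos (by omega)]
    rw [padA]; rw [if_neg (by simp [List.length_append]; omega)]
    simp only [h3, List.append_assoc, Prod.mk.injEq]
    refine ⟨by rfl, by push_cast; ring⟩
  · omega

lemma foldl_append_map {α β : Type} (xs : List α) (f : α → β) :
    ∀ init : List β, xs.foldl (fun acc i => acc ++ [f i]) init = init ++ xs.map f := by
  induction xs with
  | nil => simp
  | cons x t ih => intro init; simp [List.foldl_cons, ih, List.append_assoc]

lemma pyRange3 (m : Nat) :
    PySem.List.pyRange 0 ((3 * m : Nat) : Int) 3 = (List.range m).map (fun k => ((3 * k : Nat) : Int)) := by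
  rw [PySem.List.pyRange_of_pos 0 _ (by norm_num)]
  rcases Nat.eq_zero_or_pos m with hm | hm
  · subst hm; simp
  · rw [if_pos (by push_cast; omega)]
    have : ((((3 * m : Nat) : Int) - 0 + 3 - 1) / 3).toNat = m := by omega
    rw [this]
    apply List.map_congr_left
    intro k _
    push_cast; ring

lemma chunk_dt {α : Type} (m : Nat) : ∀ l : List α, l.length = 3 * m →
    (List.range m).map (fun k => (l.drop (3 * k)).take 3) = chunk3 l := by
  induction m with
  | zero => intro l h; have : l = [] := List.eq_nil_of_length_eq_zero (by omega); subst this; simp [chunk3]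
  | succ n ih =>
    intro l h
    match l, h with
    | a :: b :: c :: t, h =>
      rw [List.range_succ_eq_map]
      simp only [List.map_cons, List.map_map]
      rw [chunk3]
      congr 1
      rw [← ih t (by simp at h; omega)]
      apply List.map_congr_left
      intro k _
      simp only [Function.comp_apply]
      congr 1

lemma chunk3_map {α β : Type} (f : α → β) (l : List α) :
    chunk3 (l.map f) = (chunk3 l).map (List.map f) := by
  induction l using chunk3.induct with
  | case1 a b c t ih => simp [chunk3, ih]
  | case2 l h => match l with
    | [] => simp [chunk3]
    | [a] => simp [chunk3]
    | [a, b] => simp [chunk3]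
    | a :: b :: c :: t => exact absurd rfl (h a b c t)

lemma chunk3_row_len {α : Type} (l : List α) : ∀ row ∈ chunk3 l, row.length = 3 := by
  induction l using chunk3.induct with
  | case1 a b c t ih =>
    intro row hrow
    rw [chunk3] at hrow
    rcases List.mem_cons.mp hrow with h | h
    · subst h; rfl
    · exact ih row h
  | case2 l h => match l with
    | [] => simp [chunk3]
    | [a] => simp [chunk3]
    | [a, b] => simp [chunk3]
    | a :: b :: c :: t => exact absurd rfl (h a b c t)

lemma lowersA_items :
    lowersA.items = (PySem.List.pyRange 97 123 1).map (fun x => (x, Char.ofNat x.toNat)) := by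
  unfold lowersA
  rw [PySem.Dict.items_foldl_insert_fresh (PySem.List.pyRange 97 123 1) (fun a => a)
      (fun x => Char.ofNat x.toNat) PySem.Dict.empty (by intro a _; simp [PySem.Dict.contains_empty])
      (by simpa using PySem.List.nodup_pyRange_one 97 123)]
  simp [PySem.Dict.items]
  rfl

lemma valid_ofNat_toNat (n : Nat) (h : n < 55296) : (Char.ofNat n).toNat = n := by
  rw [Char.toNat_ofNat]
  rw [if_pos (Or.inl h)]

lemma getKey_pyRange (c : Char) : ∀ (n : Nat) (a : Int), 97 ≤ a → a + n ≤ 123 →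
    a ≤ (c.toNat : Int) → (c.toNat : Int) < a + n →
    getKeyA ((PySem.List.pyRange a (a + n) 1).map (fun x => (x, Char.ofNat x.toNat))) c = some (c.toNat : Int) := by
  intro n
  induction n with
  | zero => intro a _ _ h1 h2; omega
  | succ m ih =>
    intro a ha hb h1 h2
    rw [PySem.List.pyRange_one_cons (by omega)]
    simp only [List.map_cons]
    rw [getKeyA]
    by_cases hc : a = (c.toNat : Int)
    · have : Char.ofNat a.toNat = c := by
        rw [show a.toNat = c.toNat from by omega]
        exact Char.ofNat_toNat c
      rw [if_pos (by simp [this])]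
      rw [hc]
    · have hne : Char.ofNat a.toNat ≠ c := by
        intro he
        have := congrArg Char.toNat he
        rw [valid_ofNat_toNat a.toNat (by omega)] at this
        omega
      rw [if_neg (by simpa using hne)]
      rw [show a + ((m + 1 : Nat) : Int) = a + 1 + (m : Int) from by push_cast; ring]
      exact ih (a + 1) (by omega) (by omega) (by omega) (by push_cast at h2 ⊢; omega)

lemma elemA_lower (c : Char) (h1 : 97 ≤ c.toNat) (h2 : c.toNat ≤ 122) :
    elemA c = (c.toNat : Int) - 97 := by
  unfold elemA
  rw [lowersA_items]
  rw [show (123 : Int) = 97 + (26 : Nat) from by norm_num]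
  rw [getKey_pyRange c 26 97 (by norm_num) (by norm_num) (by push_cast; omega) (by push_cast; omega)]

lemma char_le_iff (a b : Char) : a ≤ b ↔ a.toNat ≤ b.toNat := by
  rw [Char.le_def]
  exact UInt32.le_iff_toNat_le

lemma lowerChar_alpha_bounds (c : Char) (h : PySem.Chars.isalpha c = true) :
    97 ≤ (PySem.Chars.lowerChar c).toNat ∧ (PySem.Chars.lowerChar c).toNat ≤ 122 := by
  unfold PySem.Chars.isalpha PySem.Chars.isupper PySem.Chars.islower at h
  simp only [Bool.or_eq_true, Bool.and_eq_true, decide_eq_true_eq, char_le_iff] at h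
  unfold PySem.Chars.lowerChar PySem.Chars.isupper
  by_cases hu : 'A' ≤ c ∧ c ≤ 'Z'
  · rw [if_pos (by simp only [Bool.and_eq_true, decide_eq_true_eq]; exact ⟨hu.1, hu.2⟩)]
    rw [char_le_iff, char_le_iff] at hu
    rw [Char.toNat_ofNat, if_pos (Or.inl (by simp at hu ⊢; omega))]
    simp at hu ⊢
    omega
  · rw [if_neg (by simp only [Bool.and_eq_true, decide_eq_true_eq]; exact fun hx => hu hx)]
    rw [char_le_iff, char_le_iff] at hu
    rcases h with h | h
    · exfalso; exact hu ⟨by simp; omega, by simp; omega⟩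
    · simpa using h

lemma bfold_filter (cs : List Char) : ∀ st,
    cs.foldl (fun (st : List (List Int) × List Int) c =>
      if c == ' ' then st
      else
        let row := st.2 ++ [((PySem.Chars.lowerChar c).toNat : Int) - 97]
        if row.length == 3 then (st.1 ++ [row], []) else (st.1, row)) st
    = ((cs.filter (fun c => !(c == ' '))).map
        (fun c => ((PySem.Chars.lowerChar c).toNat : Int) - 97)).foldl stepI st := by
  induction cs with
  | nil => intro st; rfl
  | cons c t ih =>
    intro st
    by_cases hc : c = ' '
    · subst hc; simp only [List.foldl_cons, List.filter_cons, if_pos rfl, beq_self_eq_true]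
      simpa using ih st
    · have hb : (c == ' ') = false := by simpa using hc
      simp only [List.foldl_cons, List.filter_cons, hb, Bool.not_false, if_true, List.map_cons]
      rw [ih]
      rfl

lemma bcore : ∀ (n : Nat) (vs : List Int), vs.length ≤ n → ∀ mat,
    finishB (vs.foldl stepI (mat, [])) =
      (mat ++ chunk3 (vs ++ List.replicate ((3 - vs.length % 3) % 3) 0),
       (((3 - vs.length % 3) % 3 : Nat) : Int)) := by
  intro n
  induction n with
  | zero =>
    intro vs h mat
    have : vs = [] := List.eq_nil_of_length_eq_zero (by omega)
    subst this
    simp [finishB, chunk3]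
  | succ n ih =>
    intro vs h mat
    match vs with
    | [] => simp [finishB, chunk3]
    | [a] => simp [finishB, stepI, chunk3]
    | [a, b] => simp [finishB, stepI, chunk3]
    | a :: b :: c :: t =>
      have h3 : (a :: b :: c :: t).foldl stepI (mat, []) = t.foldl stepI (mat ++ [[a, b, c]], []) := by
        simp [stepI]
      rw [h3]
      rcases Nat.lt_or_ge n t.length with ht | ht
      · exfalso; simp at h; omega
      · rw [ih t ht (mat ++ [[a, b, c]])]
        have hm : (a :: b :: c :: t).length % 3 = t.length % 3 := by simp; omega
        rw [hm]
        rw [show (a :: b :: c :: t) ++ List.replicate ((3 - t.length % 3) % 3) 0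
              = a :: b :: c :: (t ++ List.replicate ((3 - t.length % 3) % 3) 0) from by simp]
        rw [chunk3]
        simp [List.append_assoc]

-- ===== VERDICT (by name: the statement is the Claim_ definition above) =====
theorem string_setup_spec : Claim_equal_string_setup := by
  intro s _ hpre
  unfold Spec_string_setup
  -- shared notation
  have g : Char → Int := fun c => ((PySem.Chars.lowerChar c).toNat : Int) - 97
  set cs : List Char := s.toList.filter (fun c => !(c == ' ')) with hcs
  set k : Nat := (3 - cs.length % 3) % 3 with hk
  -- every character of cs is an ASCII letter
  have halpha : ∀ c ∈ cs, PySem.Chars.isalpha c = true := by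
    intro c hc
    rw [hcs] at hc
    have h1 := List.of_mem_filter hc
    have h2 := List.mem_of_mem_filter hc
    unfold Pre_string_setup at hpre
    have := List.all_eq_true.mp hpre c h2
    simp at this h1
    tauto
  -- the cleaned character list and the lowered list
  have hL : (PySem.Str.lower (PySem.Str.replace s " " "")).toList = cs.map PySem.Chars.lowerChar := by
    rw [PySem.Str.toList_lower, PySem.Str.toList_replace]
    rw [show (" " : String).toList = [' '] from rfl, show ("" : String).toList = [] from rfl]
    rw [replace_space]
    rfl
  set l : List Char := cs.map PySem.Chars.lowerChar with hl
  have hlen : l.length = cs.length := by simp [hl]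
  set l' : List Char := l ++ List.replicate k 'a' with hl'
  have hl'len : l'.length = 3 * ((cs.length + k) / 3) := by
    rw [hl']; simp [hlen]; omega
  set m : Nat := (cs.length + k) / 3 with hm
  -- ===== A reduced to (chunk3 (l'.map elemA), k) =====
  have hA : string_setup s = (chunk3 (l'.map elemA), ((k : Nat) : Int)) := by
    have hslice : ∀ kk ∈ List.range m,
        ((fun i => PySem.List.slice l' (some (0 + i)) (some (i + 3))) ∘ fun kk : Nat => ((3 * kk : Nat) : Int)) kk
          = (l'.drop (3 * kk)).take 3 := by
      intro kk _
      simp only [Function.comp_apply, zero_add]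
      rw [show ((3 * kk : Nat) : Int) + 3 = ((3 * kk : Nat) : Int) + ((3 : Nat) : Int) from by norm_num]
      rw [PySem.List.slice_natCast_add]
    have hmat : (PySem.List.pyRange 0 (l'.length : Int) 3).foldl
        (fun acc i => acc ++ [PySem.List.slice l' (some (0 + i)) (some (i + 3))]) [] = chunk3 l' := by
      rw [foldl_append_map, List.nil_append]
      rw [show ((l'.length : Nat) : Int) = ((3 * m : Nat) : Int) from by rw [hl'len]]
      rw [pyRange3, List.map_map]
      rw [List.map_congr_left hslice]
      exact chunk_dt m l' hl'len
    have hrows : ∀ row ∈ chunk3 l',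
        (PySem.List.pyRange 0 3 1).map (fun j => elemA (PySem.List.pyGetD row j 'a'))
          = row.map elemA := by
      intro row hrow
      have hr3 := chunk3_row_len l' row hrow
      rw [show (fun j => elemA (PySem.List.pyGetD row j 'a'))
            = elemA ∘ (fun j => PySem.List.pyGetD row j 'a') from rfl]
      rw [← List.map_map]
      rw [show (3 : Int) = ((row.length : Nat) : Int) from by rw [hr3]; norm_num]
      rw [PySem.List.map_pyGetD_pyRange_zero' row 'a']
    unfold string_setup
    simp only [hL]
    rw [padA_spec]
    simp only [hlen, ← hk, ← hl']
    rw [hmat]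
    rw [List.map_congr_left hrows]
    rw [← chunk3_map]
    norm_num
  rw [hA]
  -- l'.map elemA is cs mapped to indices, padded with zeros
  have helem : l'.map elemA
      = cs.map (fun c => ((PySem.Chars.lowerChar c).toNat : Int) - 97) ++ List.replicate k 0 := by
    rw [hl', List.map_append, List.map_replicate]
    refine congrArg₂ (· ++ ·) ?_ ?_
    · rw [hl, List.map_map]
      apply List.map_congr_left
      intro c hc
      obtain ⟨hb1, hb2⟩ := lowerChar_alpha_bounds c (halpha c hc)
      exact elemA_lower _ hb1 hb2
    · rw [elemA_lower 'a' (by decide) (by decide)]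
      rw [show ((('a'.toNat : Nat) : Int) - 97 : Int) = 0 from by decide]
  rw [helem]
  -- ===== B reduced to the same value =====
  unfold string_setup_alt
  rw [bfold_filter]
  have hfin : ∀ st : List (List Int) × List Int,
      (if st.2.isEmpty then (st.1, (0 : Int))
       else (st.1 ++ [st.2 ++ List.replicate (3 - st.2.length) 0], (3 : Int) - (st.2.length : Int)))
        = finishB st := fun _ => rfl
  rw [hfin]
  rw [bcore (((s.toList.filter (fun c => !(c == ' '))).map
        (fun c => ((PySem.Chars.lowerChar c).toNat : Int) - 97)).length) _ le_rfl []]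
  simp only [List.nil_append, List.length_map, ← hcs, ← hk]
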